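-- pv_equiv track=rewrite | github.com/matekadlicsko/Open-AML-Engine | Examples/MNIST.py | getCounterTable
-- ===== SOURCE A (Python) =====
-- def getCounterTable(labels):
--     ret = [[] for x in range(10)]
--
--     i = 0
--     for l in labels:
--         d = labels[i]
--         for j in range(10):
--             if j != d:
--                 ret[j].append(i)
--         i += 1
--     return ret
-- ===== SOURCE B (Python) =====
-- def getCounterTable(labels):
--     # group indices by label, then emit each row as the complement of its bucket
--     eq = {}
--     for i, l in enumerate(labels):
--         eq.setdefault(l, []).append(i)
--     n = len(labels)
--     ret = []
--     for j in range(10):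
--         out = []
--         prev = 0
--         for e in eq.get(j, []):
--             out.extend(range(prev, e))
--             prev = e + 1
--         out.extend(range(prev, n))
--         ret.append(out)
--     return ret
-- ===== Notes on version B (the rewrite author's own statement) =====
-- stated objective: alternative
-- what changed: Instead of A's per-element fan-out appending each index to the nine non-matching of ten lists, B groups indices by label into a dict in one pass and then emits each digit's row as the complement of its bucket, concatenating the gap ranges between consecutive equal-label positions.
import Mathlib
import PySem

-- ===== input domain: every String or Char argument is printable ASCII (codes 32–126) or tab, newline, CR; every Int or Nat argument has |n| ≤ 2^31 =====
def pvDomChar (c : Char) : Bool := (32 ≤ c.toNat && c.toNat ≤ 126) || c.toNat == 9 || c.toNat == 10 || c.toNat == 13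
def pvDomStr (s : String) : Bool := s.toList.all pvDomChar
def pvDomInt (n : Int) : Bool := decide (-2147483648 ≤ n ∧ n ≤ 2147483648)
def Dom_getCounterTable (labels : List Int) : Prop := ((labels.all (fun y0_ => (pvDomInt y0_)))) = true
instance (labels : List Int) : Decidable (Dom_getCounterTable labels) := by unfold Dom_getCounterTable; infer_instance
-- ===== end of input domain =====

-- B replaces A's per-element fan-out into ten lists by grouping indices by label into a
-- dict and emitting each row as the complement (gap ranges) of its bucket (objective: alternative).

-- ===== PORT A =====
-- one pass over labels with a running counter i; each step re-reads d = labels[i] and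
-- appends i to every ret[j] with j ≠ d (the inner 'for j in range(10)' update of ret)
def getCounterTable (labels : List Int) : List (List Int) :=
  let init : List (List Int) := (List.range 10).map (fun _ => ([] : List Int))
  (labels.foldl
    (fun (st : List (List Int) × Int) l =>
      let d : Int := (PySem.List.pyGet? labels st.2).getD l   -- d = labels[i]; i is always in range, so pyGet? is some
      (((PySem.List.enumerate st.1 0).map
          (fun q => if q.1 ≠ d then q.2 ++ [st.2] else q.2)), st.2 + 1))
    (init, 0)).1

-- ===== PORT B =====
-- eq = {}; for i, l in enumerate(labels): eq.setdefault(l, []).append(i)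
-- then for each j in range(10), concatenate the index ranges between consecutive entries of eq.get(j, [])
def getCounterTable_alt (labels : List Int) : List (List Int) :=
  let eq : PySem.Dict Int (List Int) :=
    (PySem.List.enumerate labels 0).foldl
      (fun d p => d.modify p.2 ([] : List Int) (· ++ [p.1])) PySem.Dict.empty
  let n : Int := labels.length
  (PySem.List.pyRange 0 10 1).map (fun j =>
    let st := (eq.getD j []).foldl
      (fun (st : List Int × Int) e => (st.1 ++ PySem.List.pyRange st.2 e 1, e + 1))
      (([] : List Int), (0 : Int))
    st.1 ++ PySem.List.pyRange st.2 n 1)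

-- ===== PRECONDITION & SPEC =====
def Spec_getCounterTable (labels : List Int) (out : List (List Int)) : Prop := out = getCounterTable_alt labels
instance (labels : List Int) (out : List (List Int)) : Decidable (Spec_getCounterTable labels out) := by unfold Spec_getCounterTable; infer_instance

-- ===== CLAIM (what is proved, stated in full; the proofs are below) =====
def Claim_equal_getCounterTable : Prop := ∀ (labels : List Int), Dom_getCounterTable labels → Spec_getCounterTable labels (getCounterTable labels)

-- ===== LEMMAS AND PROOFS =====

-- the common normal form both ports are reduced to
def pvTarget (labels : List Int) : List (List Int) :=
  (PySem.List.pyRange 0 10 1).map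
    (fun j => (PySem.List.enumerate labels 0).filterMap
      (fun p => if p.2 ≠ j then some p.1 else none))

-- ---- A-side lemmas ----

-- A's foldl over labels with a counter equals a foldl over the enumerated list
theorem pv_foldl_counter
    (f : List (List Int) → Int → Int → List (List Int)) :
    ∀ (xs : List Int) (s : List (List Int)) (i : Int),
    (xs.foldl (fun (st : List (List Int) × Int) l => (f st.1 st.2 l, st.2 + 1)) (s, i)).1
      = (PySem.List.enumerate xs i).foldl (fun s p => f s p.1 p.2) s := by
  intro xs
  induction xs with
  | nil => intro s i; simp [PySem.List.enumerate_nil]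
  | cons x xs ih => intro s i; simp [PySem.List.enumerate_cons, ih]

-- on elements of 'enumerate labels 0' the re-read labels[i] yields the element itself
theorem pv_d_eq (labels : List Int) (p : Int × Int) (hp : p ∈ PySem.List.enumerate labels 0) :
    (PySem.List.pyGet? labels p.1).getD p.2 = p.2 := by
  rcases (PySem.List.mem_enumerate_iff _ _ _).1 hp with ⟨k, hk, rfl⟩
  simp [hk]

-- the per-element fan-out fold equals, position by position, the filter of the visited pairs
theorem pv_main (pairs : List (Int × Int)) :
    ∀ (s : List (List Int)),
    pairs.foldl
      (fun s (p : Int × Int) =>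
        (PySem.List.enumerate s 0).map (fun q => if q.1 ≠ p.2 then q.2 ++ [p.1] else q.2)) s
      = (PySem.List.enumerate s 0).map
          (fun q => q.2 ++ pairs.filterMap (fun p => if p.2 ≠ q.1 then some p.1 else none)) := by
  induction pairs with
  | nil =>
    intro s
    simp [PySem.List.map_snd_enumerate s 0]
  | cons p rest ih =>
    intro s
    simp only [List.foldl_cons, ih]
    apply List.ext_getElem?
    intro k
    simp only [List.getElem?_map, PySem.List.getElem?_enumerate, Option.map_map]
    cases h : s[k]? with
    | none => simp
    | some x =>
      simp only [Option.map_some, Function.comp, List.filterMap_cons]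
      by_cases hc : (k : Int) = p.2
      · simp [hc]
      · have hc' : ¬ p.2 = (k : Int) := by omega
        simp [hc, hc', List.append_assoc]

theorem pv_init_enum :
    PySem.List.enumerate ((List.range 10).map (fun _ => ([] : List Int))) 0
      = (PySem.List.pyRange 0 10 1).map (fun j => (j, ([] : List Int))) := by
  decide

theorem pv_A_eq (labels : List Int) : getCounterTable labels = pvTarget labels := by
  unfold getCounterTable pvTarget
  rw [pv_foldl_counter
        (fun s i l => (PySem.List.enumerate s 0).map
          (fun q => if q.1 ≠ (PySem.List.pyGet? labels i).getD l then q.2 ++ [i] else q.2))]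
  have hcongr := PySem.List.foldl_congr_mem
      (l := PySem.List.enumerate labels 0)
      (init := (List.range 10).map (fun _ => ([] : List Int)))
      (f := fun s (p : Int × Int) =>
        (PySem.List.enumerate s 0).map
          (fun q => if q.1 ≠ (PySem.List.pyGet? labels p.1).getD p.2 then q.2 ++ [p.1] else q.2))
      (g := fun s (p : Int × Int) =>
        (PySem.List.enumerate s 0).map (fun q => if q.1 ≠ p.2 then q.2 ++ [p.1] else q.2))
      (by intro acc p hp; simp only []; rw [pv_d_eq labels p hp])
  rw [hcongr]
  rw [pv_main, pv_init_enum, List.map_map]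
  simp

-- ---- B-side lemmas ----

-- recursive form of B's gap loop
def pvGap (ex : List Int) (prev n : Int) : List Int :=
  match ex with
  | [] => PySem.List.pyRange prev n 1
  | e :: rest => PySem.List.pyRange prev e 1 ++ pvGap rest (e + 1) n

theorem pv_gapfold_eq (n : Int) :
    ∀ (ex : List Int) (out : List Int) (prev : Int),
    (let st := ex.foldl (fun (st : List Int × Int) e => (st.1 ++ PySem.List.pyRange st.2 e 1, e + 1)) (out, prev)
     st.1 ++ PySem.List.pyRange st.2 n 1) = out ++ pvGap ex prev n := by
  intro ex
  induction ex with
  | nil => intro out prev; simp [pvGap]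
  | cons e rest ih =>
    intro out prev
    simp only [List.foldl_cons, pvGap]
    rw [ih]
    simp [List.append_assoc]

-- if every excluded position is above prev and prev is below the end, prev leads the gaps
theorem pv_gap_head (ex : List Int) (prev n : Int)
    (hex : ∀ e ∈ ex, prev < e) (hn : prev < n) :
    pvGap ex prev n = prev :: pvGap ex (prev + 1) n := by
  cases ex with
  | nil => simp [pvGap, PySem.List.pyRange_one_cons hn]
  | cons e rest =>
    have he : prev < e := hex e (by simp)
    simp [pvGap, PySem.List.pyRange_one_cons he]

-- complement of the equal-label positions = the positions with a different label
theorem pv_gap_complement (j : Int) :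
    ∀ (xs : List Int) (s : Int),
    pvGap (((PySem.List.enumerate xs s).filter (fun p => p.2 == j)).map (·.1)) s (s + xs.length)
      = (PySem.List.enumerate xs s).filterMap (fun p => if p.2 ≠ j then some p.1 else none) := by
  intro xs
  induction xs with
  | nil =>
    intro s
    simp [PySem.List.enumerate_nil, pvGap, PySem.List.pyRange_one_eq_nil (le_refl s)]
  | cons x xs ih =>
    intro s
    have hlen : s + ((x :: xs).length : Int) = (s + 1) + (xs.length : Int) := by
      simp; omega
    rw [hlen]
    simp only [PySem.List.enumerate_cons, List.filter_cons, List.filterMap_cons]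
    by_cases hx : x = j
    · simp only [hx, BEq.rfl, if_true, List.map_cons, pvGap, ite_not]
      rw [PySem.List.pyRange_one_eq_nil (le_refl s), List.nil_append, ih (s + 1)]
      simp
    · have hxb : (x == j) = false := by simp [hx]
      simp only [hxb, if_pos hx]
      rw [← ih (s + 1)]
      apply pv_gap_head
      · intro e he
        simp only [List.mem_map] at he
        rcases he with ⟨p, hp', rfl⟩
        have hp := List.mem_of_mem_filter hp'
        rcases (PySem.List.mem_enumerate_iff _ _ _).1 hp with ⟨k, hk, rfl⟩
        simp; omega
      · omega

-- B's dict bucket for key j is exactly the list of equal-label positions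
theorem pv_bucket (labels : List Int) (j : Int) :
    ((PySem.List.enumerate labels 0).foldl
        (fun d p => d.modify p.2 ([] : List Int) (· ++ [p.1])) PySem.Dict.empty).getD j []
      = ((PySem.List.enumerate labels 0).filter (fun p => p.2 == j)).map (·.1) := by
  have h : (PySem.List.enumerate labels 0).foldl
        (fun d p => d.modify p.2 ([] : List Int) (· ++ [p.1])) PySem.Dict.empty
      = ((PySem.List.enumerate labels 0).map (fun p => (p.2, p.1))).foldl
        (fun d q => d.modify q.1 ([] : List Int) (· ++ [q.2])) PySem.Dict.empty := by
    rw [List.foldl_map]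
  rw [h, PySem.Dict.getD_foldl_modify_append]
  simp [PySem.Dict.getD_empty, List.filter_map, List.map_map, Function.comp_def]

theorem pv_B_eq (labels : List Int) : getCounterTable_alt labels = pvTarget labels := by
  unfold getCounterTable_alt pvTarget
  simp only []
  apply List.map_congr_left
  intro j hj
  rw [pv_bucket, pv_gapfold_eq, List.nil_append]
  have := pv_gap_complement j labels 0
  simpa using this

-- ===== VERDICT (by name: the statement is the Claim_ definition above) =====
theorem getCounterTable_spec : Claim_equal_getCounterTable := by
  intro labels _
  unfold Spec_getCounterTable
  rw [pv_A_eq, pv_B_eq]
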